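-- pv_equiv track=rewrite | github.com/sachi-kothari93/Hashing-2 | Problem2.py | findMaxLength
-- ===== SOURCE A (Python) =====
-- def findMaxLength(nums):
--     # Running sum that treats 0 as -1 and 1 as 1
--     r_sum = 0
--
--     # Dictionary to store the earliest occurrence of each running sum
--     # Key: running sum value, Value: index of the earliest occurranc eof the r_sum
--     r_sum_freq = {}
--
--     # Initialize with sum 0 occurring at index -1 (before array starts)
--     # To handle edge case - if the longest length of the array starts at index 0
--     r_sum_freq[0] = -1
--     max_len = 0
--
--     for i in range(len(nums)):
--         # Increment running sum by -1 for 0 and +1 for 1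
--         if nums[i] == 0:
--             r_sum -= 1
--         else:
--             r_sum += 1
--
--         # If this running sum was seen before, we've found a balanced subarray
--         if r_sum in r_sum_freq:
--             max_len = max((i - r_sum_freq[r_sum]), max_len)
--         else:
--             # Store first occurrence of this running sum
--             r_sum_freq[r_sum] = i
--
--     return max_len
-- ===== SOURCE B (Python) =====
-- def findMaxLength(nums):
--     # Brute force: try every start index, scan forward keeping a running balance.
--     n = len(nums)
--     max_len = 0
--     for i in range(n):
--         bal = 0
--         for j in range(i, n):
--             bal += -1 if nums[j] == 0 else 1
--             if bal == 0:
--                 max_len = max(max_len, j - i + 1)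
--     return max_len
-- ===== Notes on version B (the rewrite author's own statement) =====
-- stated objective: simpler
-- what changed: Replaced the one-pass prefix-sum-with-first-occurrence-dict algorithm by a direct brute-force scan: two nested loops over start/end index maintaining a running balance, recording j-i+1 whenever the balance is zero.
import Mathlib
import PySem

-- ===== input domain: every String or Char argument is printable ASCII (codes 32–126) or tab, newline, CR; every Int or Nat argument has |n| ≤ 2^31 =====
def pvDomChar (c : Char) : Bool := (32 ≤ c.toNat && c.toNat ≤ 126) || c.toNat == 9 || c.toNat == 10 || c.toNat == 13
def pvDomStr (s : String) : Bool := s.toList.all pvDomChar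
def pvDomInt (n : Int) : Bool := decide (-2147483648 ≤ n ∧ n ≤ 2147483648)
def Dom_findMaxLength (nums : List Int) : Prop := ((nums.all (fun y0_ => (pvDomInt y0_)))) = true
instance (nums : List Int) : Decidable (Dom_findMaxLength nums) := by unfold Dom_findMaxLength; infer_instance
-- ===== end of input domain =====

-- B replaces the one-pass prefix-sum/first-occurrence-dict algorithm by a plain brute-force
-- scan over all start indices with a running balance (simpler, not faster).

-- ===== PORT A =====
-- loop body of A's single for-loop (state: r_sum, r_sum_freq, max_len)
def aStep (nums : List Int) (st : Int × PySem.Dict Int Int × Int) (i : Nat) :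
    Int × PySem.Dict Int Int × Int :=
  let r_sum := if nums.getD i 0 = 0 then st.1 - 1 else st.1 + 1
  if st.2.1.contains r_sum then
    (r_sum, st.2.1, max ((i : Int) - st.2.1.getD r_sum 0) st.2.2)
  else
    (r_sum, st.2.1.insert r_sum (i : Int), st.2.2)

def findMaxLength (nums : List Int) : Int :=
  ((List.range nums.length).foldl (aStep nums) (0, PySem.Dict.empty.insert 0 (-1), 0)).2.2

-- ===== PORT B =====
-- body of B's inner loop over j (state: bal, max_len)
def bInner (nums : List Int) (i : Nat) (st : Int × Int) (j : Nat) : Int × Int :=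
  let bal := st.1 + (if nums.getD j 0 = 0 then -1 else 1)
  (bal, if bal = 0 then max st.2 ((j : Int) - (i : Int) + 1) else st.2)

-- body of B's outer loop over start index i
def bStart (nums : List Int) (max_len : Int) (i : Nat) : Int :=
  ((List.range' i (nums.length - i)).foldl (bInner nums i) (0, max_len)).2

def findMaxLength_alt (nums : List Int) : Int :=
  (List.range nums.length).foldl (bStart nums) 0

-- ===== PRECONDITION & SPEC =====
def Spec_findMaxLength (nums : List Int) (out : Int) : Prop := out = findMaxLength_alt nums
instance (nums : List Int) (out : Int) : Decidable (Spec_findMaxLength nums out) := by unfold Spec_findMaxLength; infer_instance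

-- ===== CLAIM (what is proved, stated in full; the proofs are below) =====
def Claim_equal_findMaxLength : Prop := ∀ (nums : List Int), Dom_findMaxLength nums → Spec_findMaxLength nums (findMaxLength nums)

-- ===== LEMMAS AND PROOFS =====

-- prefix sum of the ±1 encoding (0 ↦ -1, anything else ↦ +1)
def pref (nums : List Int) : Nat → Int
  | 0 => 0
  | k+1 => pref nums k + (if nums.getD k 0 = 0 then -1 else 1)

-- first index attaining the same prefix sum as index b
def fIdx (nums : List Int) (b : Nat) : Nat :=
  Nat.find (show ∃ a, pref nums a = pref nums b from ⟨b, rfl⟩)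

theorem fIdx_spec (nums : List Int) (b : Nat) : pref nums (fIdx nums b) = pref nums b :=
  Nat.find_spec (show ∃ a, pref nums a = pref nums b from ⟨b, rfl⟩)

theorem fIdx_le (nums : List Int) {a b : Nat} (h : pref nums a = pref nums b) :
    fIdx nums b ≤ a := by
  unfold fIdx; exact Nat.find_min' _ h

theorem fIdx_le_self (nums : List Int) (b : Nat) : fIdx nums b ≤ b := fIdx_le nums rfl

theorem fIdx_congr (nums : List Int) {a b : Nat} (h : pref nums a = pref nums b) :
    fIdx nums a = fIdx nums b :=
  le_antisymm (fIdx_le nums ((fIdx_spec nums b).trans h.symm))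
    (fIdx_le nums ((fIdx_spec nums a).trans h))

-- A's running maximum after m iterations
def aRec (nums : List Int) : Nat → Int
  | 0 => 0
  | m+1 => max (aRec nums m) (((m : Int) + 1) - (fIdx nums (m+1) : Int))

theorem aRec_nonneg (nums : List Int) : ∀ m, 0 ≤ aRec nums m
  | 0 => le_refl 0
  | m+1 => le_trans (aRec_nonneg nums m) (le_max_left _ _)

theorem aRec_mono (nums : List Int) {m m' : Nat} (h : m ≤ m') : aRec nums m ≤ aRec nums m' := by
  induction m', h using Nat.le_induction with
  | base => exact le_refl _
  | succ n hmn ih => exact le_trans ih (le_max_left _ _)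

-- loop invariant of A's fold: running sum, dictionary contents, running maximum
theorem aFold (nums : List Int) : ∀ m, ∃ d : PySem.Dict Int Int,
    (List.range m).foldl (aStep nums) (0, PySem.Dict.empty.insert 0 (-1), 0)
      = (pref nums m, d, aRec nums m)
    ∧ (∀ s : Int, d.contains s = true ↔ ∃ a, a ≤ m ∧ pref nums a = s)
    ∧ (∀ b, b ≤ m → d.getD (pref nums b) 0 = (fIdx nums b : Int) - 1) := by
  intro m
  induction m with
  | zero =>
    refine ⟨PySem.Dict.empty.insert 0 (-1), rfl, ?_, ?_⟩
    · intro s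
      constructor
      · intro hs
        refine ⟨0, le_refl 0, ?_⟩
        simp [PySem.Dict.contains_insert] at hs
        simp [pref, hs]
      · rintro ⟨a, ha, hpa⟩
        interval_cases a
        simp [← hpa, pref]
    · intro b hb
      interval_cases b
      have h0 : fIdx nums 0 = 0 := Nat.le_zero.mp (fIdx_le_self nums 0)
      simp [pref, h0]
  | succ m ih =>
    obtain ⟨d, hfold, hcont, hval⟩ := ih
    rw [List.range_succ, List.foldl_append, hfold]
    have hsum : (if nums.getD m 0 = 0 then pref nums m - 1 else pref nums m + 1)
        = pref nums (m+1) := by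
      show _ = pref nums m + _
      split_ifs <;> ring
    by_cases hc : d.contains (pref nums (m+1)) = true
    · -- key already present: look up, do not insert
      obtain ⟨a, ham, hpa⟩ := (hcont _).mp hc
      have hv : d.getD (pref nums (m+1)) 0 = (fIdx nums (m+1) : Int) - 1 := by
        have := hval a ham
        rwa [hpa, fIdx_congr nums hpa] at this
      refine ⟨d, ?_, ?_, ?_⟩
      · show aStep nums (pref nums m, d, aRec nums m) m = _
        simp only [aStep, hsum, hc, if_true, hv]
        refine congrArg (fun z => (pref nums (m+1), d, z)) ?_
        rw [max_comm]
        show max (aRec nums m) _ = max (aRec nums m) _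
        congr 1
        ring
      · intro s
        rw [hcont s]
        constructor
        · rintro ⟨a', ha', hpa'⟩; exact ⟨a', le_trans ha' (Nat.le_succ m), hpa'⟩
        · rintro ⟨a', ha', hpa'⟩
          by_cases h : a' = m+1
          · subst h; exact ⟨a, ham, hpa.trans hpa'⟩
          · exact ⟨a', by omega, hpa'⟩
      · intro b hb
        by_cases h : b = m+1
        · subst h; exact hv
        · exact hval b (by omega)
    · -- key absent: insert it
      have hnone : ∀ a, a ≤ m → pref nums a ≠ pref nums (m+1) := by
        intro a ha hpa
        exact hc ((hcont _).mpr ⟨a, ha, hpa⟩)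
      have hf : fIdx nums (m+1) = m+1 := by
        refine le_antisymm (fIdx_le_self nums (m+1)) ?_
        by_contra hlt
        exact hnone (fIdx nums (m+1)) (Nat.lt_succ_iff.mp (Nat.lt_of_not_le hlt))
          (fIdx_spec nums (m+1))
      refine ⟨d.insert (pref nums (m+1)) (m : Int), ?_, ?_, ?_⟩
      · show aStep nums (pref nums m, d, aRec nums m) m = _
        simp only [aStep, hsum, hc, if_false, Bool.false_eq_true]
        refine congrArg (fun z => (pref nums (m+1), d.insert (pref nums (m+1)) (m : Int), z)) ?_
        show aRec nums m = max (aRec nums m) _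
        rw [hf]
        have : ((m : Int) + 1) - ((m+1 : Nat) : Int) = 0 := by push_cast; ring
        rw [this, max_eq_left (aRec_nonneg nums m)]
      · intro s
        rw [PySem.Dict.contains_insert, Bool.or_eq_true, beq_iff_eq, hcont s]
        constructor
        · rintro (h | ⟨a', ha', hpa'⟩)
          · exact ⟨m+1, le_refl _, h.symm⟩
          · exact ⟨a', le_trans ha' (Nat.le_succ m), hpa'⟩
        · rintro ⟨a', ha', hpa'⟩
          by_cases h : a' = m+1
          · subst h; exact Or.inl hpa'.symm
          · exact Or.inr ⟨a', by omega, hpa'⟩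
      · intro b hb
        rw [PySem.Dict.getD_insert]
        by_cases hbe : pref nums b = pref nums (m+1)
        · rw [if_pos hbe, fIdx_congr nums hbe, hf]; push_cast; ring
        · rw [if_neg hbe]
          have h : b ≤ m := by
            by_contra hbm
            exact hbe (by rw [show b = m+1 by omega])
          exact hval b h

theorem A_eq (nums : List Int) : findMaxLength nums = aRec nums nums.length := by
  obtain ⟨d, hfold, -, -⟩ := aFold nums nums.length
  unfold findMaxLength
  rw [hfold]

-- B's inner-loop running maximum, recursively over the number of steps taken
def bIn (nums : List Int) (i : Nat) : Nat → Int → Int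
  | 0, m => m
  | t+1, m =>
    if pref nums (i+t+1) = pref nums i then max (bIn nums i t m) ((t : Int) + 1)
    else bIn nums i t m

theorem bIn_succ (nums : List Int) (i t : Nat) (m : Int) :
    bIn nums i (t+1) m = if pref nums (i+t+1) = pref nums i
      then max (bIn nums i t m) ((t : Int) + 1) else bIn nums i t m := rfl

theorem bIn_ge (nums : List Int) (i : Nat) : ∀ t m, m ≤ bIn nums i t m := by
  intro t
  induction t with
  | zero => intro m; exact le_refl m
  | succ t ih =>
    intro m
    rw [bIn_succ]
    split_ifs
    · exact le_trans (ih m) (le_max_left _ _)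
    · exact ih m

theorem bIn_step_ge (nums : List Int) (i t : Nat) (m : Int) :
    bIn nums i t m ≤ bIn nums i (t+1) m := by
  rw [bIn_succ]
  split_ifs
  · exact le_max_left _ _
  · exact le_refl _

-- the inner fold computes bal = pref (i+t) - pref i and the running maximum bIn
theorem bInFold (nums : List Int) (i : Nat) : ∀ t m,
    (List.range' i t).foldl (bInner nums i) (0, m)
      = (pref nums (i+t) - pref nums i, bIn nums i t m) := by
  intro t
  induction t with
  | zero => intro m; simp [bIn]
  | succ t ih =>
    intro m
    rw [List.range'_concat, List.foldl_append, ih m]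
    simp only [one_mul, List.foldl_cons, List.foldl_nil]
    show bInner nums i _ (i+t) = _
    unfold bInner
    have hbal : pref nums (i+t) - pref nums i + (if nums.getD (i+t) 0 = 0 then -1 else 1)
        = pref nums (i+t+1) - pref nums i := by
      show _ = pref nums (i+t) + _ - pref nums i
      ring
    simp only [hbal]
    refine congrArg (fun z => (pref nums (i+t+1) - pref nums i, z)) ?_
    show (if pref nums (i+t+1) - pref nums i = 0 then max (bIn nums i t m) _ else bIn nums i t m)
        = bIn nums i (t+1) m
    rw [bIn_succ]
    by_cases h : pref nums (i+t+1) = pref nums i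
    · rw [if_pos h, if_pos (sub_eq_zero_of_eq h)]
      congr 1
      push_cast
      ring
    · rw [if_neg h, if_neg (fun hc => h (sub_eq_zero.mp hc))]

-- B's outer-loop running maximum after the first m start indices
def bOut (nums : List Int) : Nat → Int
  | 0 => 0
  | m+1 => bIn nums m (nums.length - m) (bOut nums m)

theorem B_eq (nums : List Int) : findMaxLength_alt nums = bOut nums nums.length := by
  unfold findMaxLength_alt
  suffices h : ∀ m, (List.range m).foldl (bStart nums) 0 = bOut nums m from h nums.length
  intro m
  induction m with
  | zero => rfl
  | succ m ih =>
    rw [List.range_succ, List.foldl_append, ih]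
    show bStart nums (bOut nums m) m = _
    unfold bStart
    rw [bInFold nums m (nums.length - m) (bOut nums m)]
    rfl

theorem bOut_nonneg (nums : List Int) : ∀ m, 0 ≤ bOut nums m
  | 0 => le_refl 0
  | m+1 => le_trans (bOut_nonneg nums m) (bIn_ge nums m _ _)

theorem bOut_mono (nums : List Int) {m m' : Nat} (h : m ≤ m') : bOut nums m ≤ bOut nums m' := by
  induction m', h using Nat.le_induction with
  | base => exact le_refl _
  | succ n hmn ih => exact le_trans ih (bIn_ge nums n _ _)

theorem bIn_pair (nums : List Int) (i : Nat) : ∀ t m {s : Nat}, 1 ≤ s → s ≤ t →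
    pref nums (i+s) = pref nums i → (s : Int) ≤ bIn nums i t m := by
  intro t
  induction t with
  | zero => intro m s h1 h2 _; omega
  | succ t ih =>
    intro m s h1 h2 hp
    by_cases hst : s = t+1
    · subst hst
      rw [bIn_succ]
      rw [if_pos (show pref nums (i+t+1) = pref nums i from hp)]
      refine le_trans ?_ (le_max_right _ _)
      push_cast; exact le_refl _
    · exact le_trans (ih m h1 (by omega) hp) (bIn_step_ge nums i t m)

theorem bIn_att (nums : List Int) (i : Nat) : ∀ t m,
    bIn nums i t m = m ∨ ∃ s, 1 ≤ s ∧ s ≤ t ∧ pref nums (i+s) = pref nums i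
      ∧ bIn nums i t m = (s : Int) := by
  intro t
  induction t with
  | zero => intro m; exact Or.inl rfl
  | succ t ih =>
    intro m
    rw [bIn_succ]
    split_ifs with h
    · rcases max_choice (bIn nums i t m) ((t : Int) + 1) with hm | hm
      · rw [hm]
        rcases ih m with h' | ⟨s, h1, h2, hp, hv⟩
        · exact Or.inl h'
        · exact Or.inr ⟨s, h1, by omega, hp, hv⟩
      · rw [hm]
        refine Or.inr ⟨t+1, by omega, le_refl _, h, ?_⟩
        push_cast; ring
    · rcases ih m with h' | ⟨s, h1, h2, hp, hv⟩
      · exact Or.inl h'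
      · exact Or.inr ⟨s, h1, by omega, hp, hv⟩

-- any balanced pair (a, b) bounds bOut from below
theorem bOut_pair (nums : List Int) {a b m : Nat} (hab : a < b) (hb : b ≤ nums.length)
    (hm : b ≤ m) (hp : pref nums a = pref nums b) : (b : Int) - (a : Int) ≤ bOut nums m := by
  have h1 : (((b - a : Nat)) : Int) ≤ bIn nums a (nums.length - a) (bOut nums a) := by
    refine bIn_pair nums a _ _ (by omega) (by omega) ?_
    rw [show a + (b - a) = b by omega]; exact hp.symm
  have h2 : bIn nums a (nums.length - a) (bOut nums a) = bOut nums (a+1) := rfl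
  have h3 : bOut nums (a+1) ≤ bOut nums m := bOut_mono nums (by omega)
  have hcast : (((b - a : Nat)) : Int) = (b : Int) - (a : Int) := by
    push_cast [Nat.cast_sub (le_of_lt hab)]; ring
  rw [← hcast]
  exact le_trans h1 (h2 ▸ h3)

theorem bOut_att (nums : List Int) : ∀ m, m ≤ nums.length →
    bOut nums m = 0 ∨ ∃ a b, a < b ∧ b ≤ nums.length ∧ pref nums a = pref nums b
      ∧ bOut nums m = (b : Int) - (a : Int) := by
  intro m
  induction m with
  | zero => intro _; exact Or.inl rfl
  | succ m ih =>
    intro hm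
    have hstep : bOut nums (m+1) = bIn nums m (nums.length - m) (bOut nums m) := rfl
    rw [hstep]
    rcases bIn_att nums m (nums.length - m) (bOut nums m) with h | ⟨s, h1, h2, hp, hv⟩
    · rw [h]; exact ih (by omega)
    · refine Or.inr ⟨m, m+s, by omega, by omega, hp.symm, ?_⟩
      rw [hv]; push_cast; ring

theorem aRec_pair (nums : List Int) {a b m : Nat} (hab : a < b) (hb : b ≤ m)
    (hp : pref nums a = pref nums b) : (b : Int) - (a : Int) ≤ aRec nums m := by
  obtain ⟨c, rfl⟩ : ∃ c, b = c + 1 := ⟨b - 1, by omega⟩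
  have h1 : ((c+1 : Nat) : Int) - (fIdx nums (c+1) : Int) ≤ aRec nums (c+1) := by
    refine le_trans ?_ (le_max_right (aRec nums c) _)
    push_cast; ring_nf; exact le_refl _
  have h2 : ((c+1 : Nat) : Int) - (a : Int) ≤ ((c+1 : Nat) : Int) - (fIdx nums (c+1) : Int) := by
    have := fIdx_le nums hp
    omega
  exact le_trans (le_trans h2 h1) (aRec_mono nums hb)

theorem aRec_att (nums : List Int) : ∀ m,
    aRec nums m = 0 ∨ ∃ a b, a < b ∧ b ≤ m ∧ pref nums a = pref nums b
      ∧ aRec nums m = (b : Int) - (a : Int) := by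
  intro m
  induction m with
  | zero => exact Or.inl rfl
  | succ m ih =>
    rcases max_choice (aRec nums m) (((m : Int) + 1) - (fIdx nums (m+1) : Int)) with hm | hm
    · rw [show aRec nums (m+1) = max (aRec nums m) _ from rfl, hm]
      rcases ih with h | ⟨a, b, h1, h2, hp, hv⟩
      · exact Or.inl h
      · exact Or.inr ⟨a, b, h1, by omega, hp, hv⟩
    · rw [show aRec nums (m+1) = max (aRec nums m) _ from rfl, hm]
      by_cases hf : fIdx nums (m+1) = m+1
      · rw [hf]
        exact Or.inl (by push_cast; ring)
      · have hlt : fIdx nums (m+1) < m+1 := lt_of_le_of_ne (fIdx_le_self nums (m+1)) hf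
        refine Or.inr ⟨fIdx nums (m+1), m+1, hlt, le_refl _, fIdx_spec nums (m+1), ?_⟩
        push_cast; ring

theorem main_eq (nums : List Int) : aRec nums nums.length = bOut nums nums.length := by
  apply le_antisymm
  · rcases aRec_att nums nums.length with h | ⟨a, b, h1, h2, hp, hv⟩
    · rw [h]; exact bOut_nonneg nums _
    · rw [hv]; exact bOut_pair nums h1 h2 h2 hp
  · rcases bOut_att nums nums.length (le_refl _) with h | ⟨a, b, h1, h2, hp, hv⟩
    · rw [h]; exact aRec_nonneg nums _
    · rw [hv]; exact aRec_pair nums h1 h2 hp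

-- ===== VERDICT (by name: the statement is the Claim_ definition above) =====
theorem findMaxLength_spec : Claim_equal_findMaxLength := by
  intro nums _
  show findMaxLength nums = findMaxLength_alt nums
  rw [A_eq, B_eq, main_eq]
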